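-- pv_equiv track=rewrite | github.com/gun8217/conda | test/function/utils_test.py | max_min_idx
-- ===== SOURCE A (Python) =====
-- def cal_max(data):
--     max_val = None
--     for sample in data:
--         if max_val == None or sample > max_val:
--             max_val = sample
--     return max_val
--
-- def cal_min(data):
--     min_val = None
--     for sample in data:
--         if min_val == None or sample < min_val:
--             min_val = sample
--     return min_val
--
-- def max_min_idx(data):
--     max_val, min_val = cal_max(data), cal_min(data)
--     max_idx, min_idx = None, None
--     for idx, sample in enumerate(data):
--         if sample == max_val:
--             max_idx = idx
--         if sample == min_val:
--             min_idx = idx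
--
--     return max_idx, min_idx
-- ===== SOURCE B (Python) =====
-- def max_min_idx(data):
--     max_val = min_val = max_idx = min_idx = None
--     for idx, sample in enumerate(data):
--         if max_val is None or sample >= max_val:
--             max_val, max_idx = sample, idx
--         if min_val is None or sample <= min_val:
--             min_val, min_idx = sample, idx
--     return max_idx, min_idx
-- ===== Notes on version B (the rewrite author's own statement) =====
-- stated objective: simpler
-- what changed: B replaces A's three passes (cal_max, cal_min, then an index-matching scan) by a single pass that tracks the running max/min together with their last indices (>=/<= so ties keep the later index).
import Mathlib
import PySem

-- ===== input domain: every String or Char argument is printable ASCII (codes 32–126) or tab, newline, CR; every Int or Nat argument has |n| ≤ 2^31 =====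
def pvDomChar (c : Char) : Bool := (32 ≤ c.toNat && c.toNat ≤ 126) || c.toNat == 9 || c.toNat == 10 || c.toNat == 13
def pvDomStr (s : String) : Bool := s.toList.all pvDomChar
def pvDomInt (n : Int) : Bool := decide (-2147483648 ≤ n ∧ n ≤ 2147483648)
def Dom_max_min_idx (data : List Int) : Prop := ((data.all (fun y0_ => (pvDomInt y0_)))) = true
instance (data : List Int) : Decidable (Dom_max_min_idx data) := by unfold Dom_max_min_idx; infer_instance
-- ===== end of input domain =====

-- B is a single pass tracking running max/min with their last indices, replacing A's three passes; return value only, no side effects.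

-- ===== PORT A =====
-- cal_max: running maximum (None-seeded)
def calMax (data : List Int) : Option Int :=
  data.foldl (fun m s =>
    match m with
    | none => some s
    | some v => if s > v then some s else some v) none

-- cal_min: running minimum (None-seeded)
def calMin (data : List Int) : Option Int :=
  data.foldl (fun m s =>
    match m with
    | none => some s
    | some v => if s < v then some s else some v) none

-- loop body of A's index pass, per component: `if sample == max_val: max_idx = idx`
def aStepMax (mv : Option Int) (p : Option Int) (is : Int × Int) : Option Int :=
  if some is.2 = mv then some is.1 else p
def aStepMin (nv : Option Int) (p : Option Int) (is : Int × Int) : Option Int :=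
  if some is.2 = nv then some is.1 else p

def max_min_idx (data : List Int) : Option Int × Option Int :=
  let mv := calMax data
  let nv := calMin data
  (PySem.List.enumerate data).foldl
    (fun (p : Option Int × Option Int) is => (aStepMax mv p.1 is, aStepMin nv p.2 is))
    (none, none)

-- ===== PORT B =====
-- loop body of B, per component: state (running value, its last index)
def bStepMax (st : Option Int × Option Int) (is : Int × Int) : Option Int × Option Int :=
  match st.1 with
  | none => (some is.2, some is.1)
  | some v => if is.2 ≥ v then (some is.2, some is.1) else (some v, st.2)
def bStepMin (st : Option Int × Option Int) (is : Int × Int) : Option Int × Option Int :=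
  match st.1 with
  | none => (some is.2, some is.1)
  | some v => if is.2 ≤ v then (some is.2, some is.1) else (some v, st.2)

def max_min_idx_alt (data : List Int) : Option Int × Option Int :=
  let st := (PySem.List.enumerate data).foldl
    (fun (st : (Option Int × Option Int) × (Option Int × Option Int)) is =>
      (bStepMax st.1 is, bStepMin st.2 is))
    ((none, none), (none, none))
  (st.1.2, st.2.2)

-- ===== PRECONDITION & SPEC =====
def Spec_max_min_idx (data : List Int) (out : Option Int × Option Int) : Prop := out = max_min_idx_alt data
instance (data : List Int) (out : Option Int × Option Int) : Decidable (Spec_max_min_idx data out) := by unfold Spec_max_min_idx; infer_instance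

-- ===== CLAIM (what is proved, stated in full; the proofs are below) =====
def Claim_equal_max_min_idx : Prop := ∀ (data : List Int), Dom_max_min_idx data → Spec_max_min_idx data (max_min_idx data)

-- ===== LEMMAS AND PROOFS =====

-- a foldl whose step acts independently on the two components splits into two foldls
theorem foldl_prod_split {α β γ : Type} (f : α → γ → α) (g : β → γ → β) :
    ∀ (l : List γ) (a : α) (b : β),
      l.foldl (fun p c => (f p.1 c, g p.2 c)) (a, b) = (l.foldl f a, l.foldl g b) := by
  intro l
  induction l with
  | nil => intro a b; rfl
  | cons c l ih => intro a b; simpa [List.foldl] using ih (f a c) (g b c)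

theorem calMax_ne_none (x : Int) (xs : List Int) : calMax (x :: xs) ≠ none := by
  unfold calMax
  simp only [List.foldl]
  induction xs generalizing x with
  | nil => simp
  | cons y ys ih =>
    simp only [List.foldl]
    by_cases h : y > x <;> simp [h, ih]

theorem calMin_ne_none (x : Int) (xs : List Int) : calMin (x :: xs) ≠ none := by
  unfold calMin
  simp only [List.foldl]
  induction xs generalizing x with
  | nil => simp
  | cons y ys ih =>
    simp only [List.foldl]
    by_cases h : y < x <;> simp [h, ih]

theorem enumerate_append_single (xs : List Int) (x : Int) :
    PySem.List.enumerate (xs ++ [x]) = PySem.List.enumerate xs ++ [((xs.length : Int), x)] := by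
  rw [PySem.List.enumerate_append]
  simp [PySem.List.enumerate_cons, PySem.List.enumerate_nil]

-- the max component of B's single pass computes A's (max value, last index of it)
theorem max_side (xs : List Int) :
    (PySem.List.enumerate xs).foldl bStepMax (none, none) =
      (calMax xs, (PySem.List.enumerate xs).foldl (aStepMax (calMax xs)) none) := by
  induction xs using List.reverseRecOn with
  | nil => rfl
  | append_singleton xs x ih =>
    rw [enumerate_append_single, List.foldl_append, List.foldl_append, ih]
    have hcal : calMax (xs ++ [x]) =
        match calMax xs with
        | none => some x
        | some v => if x > v then some x else some v := by
      unfold calMax; rw [List.foldl_append]; rfl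
    cases hxs : calMax xs with
    | none =>
      have hnil : xs = [] := by
        cases xs with
        | nil => rfl
        | cons y ys => exact absurd hxs (calMax_ne_none y ys)
      subst hnil
      simp [calMax, bStepMax, aStepMax, PySem.List.enumerate_nil]
    | some v =>
      rw [hxs] at hcal
      by_cases hge : x ≥ v
      · by_cases hgt : x > v
        · have : calMax (xs ++ [x]) = some x := by rw [hcal]; simp [hgt]
          rw [this]
          simp [bStepMax, aStepMax, hge]
        · have hxv : x = v := le_antisymm (not_lt.mp hgt) hge
          have : calMax (xs ++ [x]) = some v := by rw [hcal]; simp [hgt]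
          rw [this]
          subst hxv
          simp [bStepMax, aStepMax]
      · have hlt : x < v := not_le.mp hge
        have : calMax (xs ++ [x]) = some v := by rw [hcal]; simp [not_lt.mpr (le_of_lt hlt)]
        rw [this]
        have hne : ¬ (some x = some v) := by simp [ne_of_lt hlt]
        simp [bStepMax, aStepMax, hge, hne]

-- the min component, symmetrically
theorem min_side (xs : List Int) :
    (PySem.List.enumerate xs).foldl bStepMin (none, none) =
      (calMin xs, (PySem.List.enumerate xs).foldl (aStepMin (calMin xs)) none) := by
  induction xs using List.reverseRecOn with
  | nil => rfl
  | append_singleton xs x ih =>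
    rw [enumerate_append_single, List.foldl_append, List.foldl_append, ih]
    have hcal : calMin (xs ++ [x]) =
        match calMin xs with
        | none => some x
        | some v => if x < v then some x else some v := by
      unfold calMin; rw [List.foldl_append]; rfl
    cases hxs : calMin xs with
    | none =>
      have hnil : xs = [] := by
        cases xs with
        | nil => rfl
        | cons y ys => exact absurd hxs (calMin_ne_none y ys)
      subst hnil
      simp [calMin, bStepMin, aStepMin, PySem.List.enumerate_nil]
    | some v =>
      rw [hxs] at hcal
      by_cases hle : x ≤ v
      · by_cases hlt : x < v
        · have : calMin (xs ++ [x]) = some x := by rw [hcal]; simp [hlt]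
          rw [this]
          simp [bStepMin, aStepMin, hle]
        · have hxv : x = v := le_antisymm hle (not_lt.mp hlt)
          have : calMin (xs ++ [x]) = some v := by rw [hcal]; simp [hlt]
          rw [this]
          subst hxv
          simp [bStepMin, aStepMin]
      · have hgt : v < x := not_le.mp hle
        have : calMin (xs ++ [x]) = some v := by rw [hcal]; simp [not_lt.mpr (le_of_lt hgt)]
        rw [this]
        have hne : ¬ (some x = some v) := by simp [(ne_of_lt hgt).symm]
        simp [bStepMin, aStepMin, hle, hne]

-- ===== VERDICT (by name: the statement is the Claim_ definition above) =====
theorem max_min_idx_spec : Claim_equal_max_min_idx := by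
  intro data _
  unfold Spec_max_min_idx max_min_idx max_min_idx_alt
  rw [foldl_prod_split (aStepMax (calMax data)) (aStepMin (calMin data)),
      foldl_prod_split bStepMax bStepMin, max_side, min_side]
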